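-- pv_equiv track=rewrite | github.com/hubmapconsortium/antibodies-tsv-util | antibodies_tsv_util/utils.py | add_cycle_channel_numbers
-- ===== SOURCE A (Python) =====
-- from typing import List, Optional
--
-- def add_cycle_channel_numbers(channel_names: List[str]) -> List[str]:
--     """
--     Adds cycle and channel info during the collect dataset info step. Replaces a similar function that adds a number on the end of duplicate channel names.
--     """
--     new_names = []
--     cycle_count = 1
--     channel_count = 1
--
--     for original_name in channel_names:
--         new_name = f"cyc{cycle_count}_ch{channel_count}_orig{original_name}"
--         new_names.append(new_name)
--
--         channel_count += 1
--         if channel_count > 4:  # Assuming 4 channels per cycle, modify accordingly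
--             channel_count = 1
--             cycle_count += 1
--
--     return new_names
-- ===== SOURCE B (Python) =====
-- def add_cycle_channel_numbers(channel_names):
--     """Chunked version: walk the chunk start offsets (one chunk of 4 per cycle)
--     and tag each chunk's members by zipping it with range(1, 5)."""
--     out = []
--     for cycle, start in enumerate(range(0, len(channel_names), 4), 1):
--         for ch, name in zip(range(1, 5), channel_names[start:start + 4]):
--             out.append(f"cyc{cycle}_ch{ch}_orig{name}")
--     return out
-- ===== Notes on version B (the rewrite author's own statement) =====
-- stated objective: alternative
-- what changed: Replaced A's single per-element pass with running cycle/channel counters and a reset branch by a two-level chunked traversal: an outer loop over chunk start offsets range(0, n, 4) (one chunk per cycle) and an inner zip of each 4-slice with range(1, 5) for the channel numbers.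
import Mathlib
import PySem

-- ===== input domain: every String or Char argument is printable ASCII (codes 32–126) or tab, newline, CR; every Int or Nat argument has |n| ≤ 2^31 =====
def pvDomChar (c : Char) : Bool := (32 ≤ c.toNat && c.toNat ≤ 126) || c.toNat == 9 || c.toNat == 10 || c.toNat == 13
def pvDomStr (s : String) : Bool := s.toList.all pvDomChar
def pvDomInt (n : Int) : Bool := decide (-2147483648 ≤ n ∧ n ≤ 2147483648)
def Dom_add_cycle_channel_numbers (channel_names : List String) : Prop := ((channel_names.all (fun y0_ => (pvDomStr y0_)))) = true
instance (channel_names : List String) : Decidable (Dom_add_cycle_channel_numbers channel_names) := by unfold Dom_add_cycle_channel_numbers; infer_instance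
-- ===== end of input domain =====

-- B replaces A's per-element counters with a two-level chunked traversal (outer loop
-- over chunk start offsets range(0, n, 4), inner zip of each 4-slice with range(1, 5));
-- alternative decomposition, same cost.

-- ===== PORT A =====
-- the loop with its two running counters (cycle_count, channel_count)
def pvALoop (names : List String) (cycle_count channel_count : Int) : List String :=
  match names with
  | [] => []
  | original_name :: rest =>
    let new_name := "cyc" ++ PySem.Int.toStr cycle_count ++ "_ch" ++ PySem.Int.toStr channel_count
        ++ "_orig" ++ original_name
    -- channel_count += 1; if channel_count > 4: channel_count = 1; cycle_count += 1
    if channel_count + 1 > 4 then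
      new_name :: pvALoop rest (cycle_count + 1) 1
    else
      new_name :: pvALoop rest cycle_count (channel_count + 1)

def add_cycle_channel_numbers (channel_names : List String) : List String :=
  pvALoop channel_names 1 1

-- ===== PORT B =====
-- outer loop: for cycle, start in enumerate(range(0, len(channel_names), 4), 1);
-- inner loop: for ch, name in zip(range(1, 5), channel_names[start:start+4]): append
def add_cycle_channel_numbers_alt (channel_names : List String) : List String :=
  (PySem.List.enumerate (PySem.List.pyRange 0 (channel_names.length : Int) 4) 1).foldl
    (fun out p =>
      out ++ ((PySem.List.pyRange 1 5 1).zip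
          (PySem.List.slice channel_names (some p.2) (some (p.2 + 4)))).map
        (fun q => "cyc" ++ PySem.Int.toStr p.1 ++ "_ch" ++ PySem.Int.toStr q.1 ++ "_orig" ++ q.2))
    []

-- ===== PRECONDITION & SPEC =====
def Spec_add_cycle_channel_numbers (channel_names : List String) (out : List String) : Prop := out = add_cycle_channel_numbers_alt channel_names
instance (channel_names : List String) (out : List String) : Decidable (Spec_add_cycle_channel_numbers channel_names out) := by unfold Spec_add_cycle_channel_numbers; infer_instance

-- ===== CLAIM (what is proved, stated in full; the proofs are below) =====
def Claim_equal_add_cycle_channel_numbers : Prop := ∀ (channel_names : List String), Dom_add_cycle_channel_numbers channel_names → Spec_add_cycle_channel_numbers channel_names (add_cycle_channel_numbers channel_names)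

-- ===== LEMMAS AND PROOFS =====

lemma pvRange15 : PySem.List.pyRange 1 5 1 = [1, 2, 3, 4] := by decide

-- induction forms for the step-4 range
lemma pvRange4_nil (a b : Int) (h : b ≤ a) : PySem.List.pyRange a b 4 = [] := by
  rw [PySem.List.pyRange_of_pos a b (by norm_num)]
  simp [show ¬ a < b by omega]

lemma pvRange4_cons (a b : Int) (h : a < b) :
    PySem.List.pyRange a b 4 = a :: PySem.List.pyRange (a + 4) b 4 := by
  rw [PySem.List.pyRange_of_pos a b (by norm_num),
      PySem.List.pyRange_of_pos (a + 4) b (by norm_num)]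
  by_cases h4 : a + 4 < b
  · have hN : ((b - a + 4 - 1) / 4).toNat = ((b - (a + 4) + 4 - 1) / 4).toNat + 1 := by omega
    rw [if_pos h, if_pos h4, hN, List.range_succ_eq_map]
    simp [List.map_map, Function.comp]
    intro k _; ring
  · have hN : ((b - a + 4 - 1) / 4).toNat = 1 := by omega
    rw [if_pos h, if_neg h4, hN]
    simp

-- A's loop consumes one chunk of ≤ 4 names at channel counts 1..4, then resets.
lemma pvAChunk (ys : List String) (c : Int) (hy : ys ≠ []) :
    pvALoop ys c 1 =
      ((PySem.List.pyRange 1 5 1).zip (ys.take 4)).map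
        (fun q => "cyc" ++ PySem.Int.toStr c ++ "_ch" ++ PySem.Int.toStr q.1 ++ "_orig" ++ q.2)
      ++ pvALoop (ys.drop 4) (c + 1) 1 := by
  match ys with
  | [] => exact absurd rfl hy
  | [a] => simp [pvALoop, pvRange15]
  | [a, b] => simp [pvALoop, pvRange15]
  | [a, b, c'] => simp [pvALoop, pvRange15]
  | a :: b :: c' :: d :: r => simp [pvALoop, pvRange15]

-- Invariant: B's fold over the remaining chunk starts, from offset i and cycle c,
-- appends exactly what A's loop produces on xs.drop i started at channel 1.
lemma pvFold_eq (xs : List String) (i : Nat) (c : Int) (out : List String) :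
    (PySem.List.enumerate (PySem.List.pyRange (i : Int) (xs.length : Int) 4) c).foldl
      (fun out p =>
        out ++ ((PySem.List.pyRange 1 5 1).zip
            (PySem.List.slice xs (some p.2) (some (p.2 + 4)))).map
          (fun q => "cyc" ++ PySem.Int.toStr p.1 ++ "_ch" ++ PySem.Int.toStr q.1 ++ "_orig" ++ q.2))
      out
    = out ++ pvALoop (xs.drop i) c 1 := by
  by_cases hi : xs.length ≤ i
  · rw [pvRange4_nil _ _ (by exact_mod_cast hi)]
    simp [PySem.List.enumerate, List.drop_eq_nil_of_le hi, pvALoop]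
  · rw [not_le] at hi
    rw [pvRange4_cons _ _ (by exact_mod_cast hi), PySem.List.enumerate_cons, List.foldl_cons]
    have hslice : PySem.List.slice xs (some (i : Int)) (some ((i : Int) + 4))
        = (xs.drop i).take 4 := by
      have := PySem.List.slice_natCast_add xs i 4
      simpa using this
    have hcast : ((i : Int) + 4) = ((i + 4 : Nat) : Int) := by push_cast; ring
    have ih := pvFold_eq xs (i + 4) (c + 1)
      (out ++ ((PySem.List.pyRange 1 5 1).zip ((xs.drop i).take 4)).map
        (fun q => "cyc" ++ PySem.Int.toStr c ++ "_ch" ++ PySem.Int.toStr q.1 ++ "_orig" ++ q.2))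
    rw [hslice, hcast, ih, List.append_assoc]
    congr 1
    have h4 := pvAChunk (xs.drop i) c (by simp; omega)
    rw [List.drop_drop] at h4
    exact h4.symm
termination_by xs.length - i
decreasing_by omega

-- ===== VERDICT (by name: the statement is the Claim_ definition above) =====
theorem add_cycle_channel_numbers_spec : Claim_equal_add_cycle_channel_numbers := by
  intro channel_names _
  unfold Spec_add_cycle_channel_numbers add_cycle_channel_numbers add_cycle_channel_numbers_alt
  have := pvFold_eq channel_names 0 1 []
  simpa using this.symm
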